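-- pv_equiv track=rewrite | github.com/asweigart/nes_zelda_map_data | overworld_map/zelda_map_parser.py | tileCoordToPixelCoord
-- ===== SOURCE A (Python) =====
-- def tileCoordToPixelCoord(tilex, tiley):
--     pixy = 0
--     for ty in range(tiley):
--         isBottomRow = (ty+1) % 11 == 0
--         if isBottomRow:
--             pixy += 8
--         else:
--             pixy += 16
--     return tilex * 16, pixy
-- ===== SOURCE B (Python) =====
-- def tileCoordToPixelCoord(tilex, tiley):
--     t = max(tiley, 0)
--     return tilex * 16, 16 * t - 8 * (t // 11)
-- ===== Notes on version B (the rewrite author's own statement) =====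
-- stated objective: faster
-- what changed: replaces the per-row accumulation loop with the closed form 16*t - 8*(t//11) on t = max(tiley, 0)
import Mathlib
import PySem

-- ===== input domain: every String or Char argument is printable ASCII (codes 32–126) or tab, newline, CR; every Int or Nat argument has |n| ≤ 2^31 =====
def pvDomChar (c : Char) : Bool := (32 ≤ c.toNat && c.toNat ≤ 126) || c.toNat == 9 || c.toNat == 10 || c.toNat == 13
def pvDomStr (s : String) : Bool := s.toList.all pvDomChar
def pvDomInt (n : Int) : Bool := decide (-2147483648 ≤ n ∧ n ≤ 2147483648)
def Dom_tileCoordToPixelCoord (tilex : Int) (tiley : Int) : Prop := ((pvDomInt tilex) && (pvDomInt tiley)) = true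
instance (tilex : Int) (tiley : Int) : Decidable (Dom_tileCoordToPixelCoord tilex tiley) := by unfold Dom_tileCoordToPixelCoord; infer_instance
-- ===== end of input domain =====

-- B replaces A's per-row accumulation loop by the closed form 16*t - 8*(t//11), t = max(tiley,0); proved equal on all inputs.

-- ===== PORT A =====
def tileCoordToPixelCoord (tilex : Int) (tiley : Int) : List Int :=
  let pixy : Int :=
    (PySem.List.pyRange 0 tiley 1).foldl
      (fun pixy ty =>
        let isBottomRow := PySem.Int.mod (ty + 1) 11 == 0
        if isBottomRow then pixy + 8 else pixy + 16) 0
  [tilex * 16, pixy]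

-- ===== PORT B =====
def tileCoordToPixelCoord_alt (tilex : Int) (tiley : Int) : List Int :=
  let t := max tiley 0
  [tilex * 16, 16 * t - 8 * PySem.Int.floordiv t 11]

-- ===== PRECONDITION & SPEC =====
def Spec_tileCoordToPixelCoord (tilex : Int) (tiley : Int) (out : List Int) : Prop := out = tileCoordToPixelCoord_alt tilex tiley
instance (tilex : Int) (tiley : Int) (out : List Int) : Decidable (Spec_tileCoordToPixelCoord tilex tiley out) := by unfold Spec_tileCoordToPixelCoord; infer_instance

-- ===== CLAIM (what is proved, stated in full; the proofs are below) =====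
def Claim_equal_tileCoordToPixelCoord : Prop := ∀ (tilex : Int) (tiley : Int), Dom_tileCoordToPixelCoord tilex tiley → Spec_tileCoordToPixelCoord tilex tiley (tileCoordToPixelCoord tilex tiley)

-- ===== LEMMAS AND PROOFS =====

lemma pv_fold_closed (n : Nat) :
    (PySem.List.pyRange 0 (n : Int) 1).foldl
      (fun pixy ty =>
        let isBottomRow := PySem.Int.mod (ty + 1) 11 == 0
        if isBottomRow then pixy + 8 else pixy + 16) 0
    = 16 * (n : Int) - 8 * PySem.Int.floordiv (n : Int) 11 := by
  induction n with
  | zero => simp [PySem.List.pyRange_one_eq_nil, PySem.Int.floordiv]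
  | succ m ih =>
    have hsplit : PySem.List.pyRange 0 ((m + 1 : Nat) : Int) 1
        = PySem.List.pyRange 0 (m : Int) 1 ++ [(m : Int)] := by
      have := PySem.List.pyRange_one_succ_right (a := 0) (b := (m : Int)) (by positivity)
      push_cast
      push_cast at this
      exact this
    rw [hsplit, List.foldl_append, ih]
    simp only [List.foldl]
    rw [PySem.Int.mod_eq_emod_of_pos (by norm_num : (0:Int) < 11),
        PySem.Int.floordiv_eq_ediv_of_pos (by norm_num : (0:Int) < 11),
        PySem.Int.floordiv_eq_ediv_of_pos (by norm_num : (0:Int) < 11)]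
    have h0 : (0 : Int) ≤ (m : Int) := by positivity
    by_cases h : ((m : Int) + 1) % 11 = 0 <;> simp [h] <;> omega

-- ===== VERDICT (by name: the statement is the Claim_ definition above) =====
theorem tileCoordToPixelCoord_spec : Claim_equal_tileCoordToPixelCoord := by
  intro tilex tiley _
  unfold Spec_tileCoordToPixelCoord tileCoordToPixelCoord tileCoordToPixelCoord_alt
  by_cases hy : tiley ≤ 0
  · rw [PySem.List.pyRange_one_eq_nil hy]
    have : max tiley 0 = 0 := by omega
    simp [this, PySem.Int.floordiv]
  · have hmax : max tiley 0 = tiley := by omega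
    obtain ⟨n, rfl⟩ : ∃ n : Nat, tiley = (n : Int) := ⟨tiley.toNat, by omega⟩
    simp only [hmax]
    rw [pv_fold_closed]
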